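-- pv_equiv track=rewrite | github.com/jangjichang/JustCode | leetcode/practice/test_3.py | countTeams
-- ===== SOURCE A (Python) =====
-- import operator as op
-- from functools import reduce
--
-- def countTeams(skills, minPlayers, minLevel, maxLevel):
--     player_counter = 0
--     for player in skills:
--         if minLevel <= player <= maxLevel:
--             player_counter += 1
--
--     if player_counter < minPlayers:
--         return 0
--
--     answer = 0
--     for min_player in range(minPlayers, player_counter + 1):
--         answer += nCr(player_counter, min_player)
--
--     return answer
--
-- def nCr(n, r):
--     if n < 1 or r < 0 or n < r:
--         raise ValueError
--     r = min(r, n - r)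
--     numerator = reduce(op.mul, range(n, n - r, -1), 1)
--     denominator = reduce(op.mul, range(1, r + 1), 1)
--     return numerator // denominator
-- ===== SOURCE B (Python) =====
-- def countTeams(skills, minPlayers, minLevel, maxLevel):
--     count = sum(1 for s in skills if minLevel <= s <= maxLevel)
--     if count < minPlayers:
--         return 0
--     # sum_{k=minPlayers}^{count} C(count,k) = 2**count - sum_{k<minPlayers} C(count,k),
--     # with C(count,k) maintained by the multiplicative recurrence.
--     coef = 1
--     below = 0
--     for k in range(minPlayers):
--         below += coef
--         coef = coef * (count - k) // (k + 1)
--     return 2 ** count - below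
-- ===== Notes on version B (the rewrite author's own statement) =====
-- stated objective: alternative
-- what changed: Instead of recomputing each binomial coefficient C(count,k) from scratch with factorial products for every k in range(minPlayers, count+1), B computes 2**count minus the prefix sum of C(count,k) for k<minPlayers, maintaining the coefficient by the multiplicative recurrence in one pass.
-- crash fix: A raises ValueError (inside nCr) whenever minPlayers < 0, or minPlayers = 0 with zero eligible players; B returns the natural value of the sum there (2**count, i.e. 1 on the empty case). — e.g. on countTeams([], 0, 0, 0): A raises ValueError, B returns 1
import Mathlib
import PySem

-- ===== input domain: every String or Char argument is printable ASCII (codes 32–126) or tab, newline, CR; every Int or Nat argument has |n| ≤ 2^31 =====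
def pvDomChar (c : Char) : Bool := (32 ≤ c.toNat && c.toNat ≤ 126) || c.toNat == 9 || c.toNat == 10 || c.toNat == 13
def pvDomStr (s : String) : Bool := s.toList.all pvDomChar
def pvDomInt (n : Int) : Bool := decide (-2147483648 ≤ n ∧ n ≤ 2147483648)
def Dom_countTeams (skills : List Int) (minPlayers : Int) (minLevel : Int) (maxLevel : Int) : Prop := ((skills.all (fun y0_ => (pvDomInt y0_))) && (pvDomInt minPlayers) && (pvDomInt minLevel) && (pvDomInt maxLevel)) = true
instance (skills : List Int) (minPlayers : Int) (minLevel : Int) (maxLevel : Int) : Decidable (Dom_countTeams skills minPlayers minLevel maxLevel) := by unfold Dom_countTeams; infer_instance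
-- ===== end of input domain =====

-- B replaces A's per-term factorial-product binomials with a single multiplicative-recurrence
-- pass: 2^count minus the prefix sum of C(count,k) for k < minPlayers (objective: alternative).

-- ===== PORT A =====
-- helper nCr: Python raises ValueError when n < 1 or r < 0 or n < r; such calls are excluded by
-- Pre_countTeams, so the port's value there (0) is never claimed about.
def nCrPort (n r : Int) : Int :=
  if n < 1 ∨ r < 0 ∨ n < r then 0
  else
    let r' := min r (n - r)
    let numerator := (PySem.List.pyRange n (n - r') (-1)).foldl (· * ·) 1
    let denominator := (PySem.List.pyRange 1 (r' + 1) 1).foldl (· * ·) 1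
    PySem.Int.floordiv numerator denominator

def countTeams (skills : List Int) (minPlayers : Int) (minLevel : Int) (maxLevel : Int) : Int :=
  let player_counter : Int :=
    skills.foldl (fun acc player => if minLevel ≤ player ∧ player ≤ maxLevel then acc + 1 else acc) 0
  if player_counter < minPlayers then 0
  else
    (PySem.List.pyRange minPlayers (player_counter + 1) 1).foldl
      (fun answer k => answer + nCrPort player_counter k) 0

-- ===== PORT B =====
def countTeams_alt (skills : List Int) (minPlayers : Int) (minLevel : Int) (maxLevel : Int) : Int :=
  let count : Int :=
    (skills.map (fun s => if minLevel ≤ s ∧ s ≤ maxLevel then (1 : Int) else 0)).sum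
  if count < minPlayers then 0
  else
    let st :=
      (PySem.List.pyRange 0 minPlayers 1).foldl
        (fun (st : Int × Int) k => (PySem.Int.floordiv (st.1 * (count - k)) (k + 1), st.2 + st.1))
        (1, 0)
    2 ^ count.toNat - st.2

-- ===== PRECONDITION & SPEC =====
-- Pre_ excludes exactly the inputs on which A raises ValueError (nCr with n < 1 or r < 0):
-- minPlayers < 0, or minPlayers = 0 with no player inside [minLevel, maxLevel].
def Pre_countTeams (skills : List Int) (minPlayers : Int) (minLevel : Int) (maxLevel : Int) : Prop :=
  1 ≤ minPlayers ∨
    (minPlayers = 0 ∧ 1 ≤ skills.countP (fun p => decide (minLevel ≤ p ∧ p ≤ maxLevel)))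
instance (skills : List Int) (minPlayers : Int) (minLevel : Int) (maxLevel : Int) : Decidable (Pre_countTeams skills minPlayers minLevel maxLevel) := by unfold Pre_countTeams; infer_instance

def pvWitness_countTeams : List Int × Int × Int × Int := ([3, 9, 4], 1, 1, 5)

-- A raises ValueError whenever minPlayers < 0, or minPlayers = 0 with zero eligible players;
-- B returns the natural value of the sum there (2**count, i.e. 1 on the empty case).
def Raises_countTeams (skills : List Int) (minPlayers : Int) (minLevel : Int) (maxLevel : Int) : Prop :=
  minPlayers < 0 ∨
    (minPlayers = 0 ∧ skills.countP (fun p => decide (minLevel ≤ p ∧ p ≤ maxLevel)) = 0)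
instance (skills : List Int) (minPlayers : Int) (minLevel : Int) (maxLevel : Int) : Decidable (Raises_countTeams skills minPlayers minLevel maxLevel) := by unfold Raises_countTeams; infer_instance

def pvRaiseWitness_countTeams : List Int × Int × Int × Int := ([], 0, 0, 0)
def pvRaiseWitnessOut_countTeams : Int := 1

def Spec_countTeams (skills : List Int) (minPlayers : Int) (minLevel : Int) (maxLevel : Int) (out : Int) : Prop := out = countTeams_alt skills minPlayers minLevel maxLevel
instance (skills : List Int) (minPlayers : Int) (minLevel : Int) (maxLevel : Int) (out : Int) : Decidable (Spec_countTeams skills minPlayers minLevel maxLevel out) := by unfold Spec_countTeams; infer_instance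

-- ===== CLAIM (what is proved, stated in full; the proofs are below) =====
def Claim_equal_countTeams : Prop := ∀ (skills : List Int) (minPlayers : Int) (minLevel : Int) (maxLevel : Int), Dom_countTeams skills minPlayers minLevel maxLevel → Pre_countTeams skills minPlayers minLevel maxLevel → Spec_countTeams skills minPlayers minLevel maxLevel (countTeams skills minPlayers minLevel maxLevel)
def Claim_raises_countTeams : Prop := (∀ (skills : List Int) (minPlayers : Int) (minLevel : Int) (maxLevel : Int), Dom_countTeams skills minPlayers minLevel maxLevel → Raises_countTeams skills minPlayers minLevel maxLevel → ¬ Pre_countTeams skills minPlayers minLevel maxLevel) ∧ (Dom_countTeams (pvRaiseWitness_countTeams.1) (pvRaiseWitness_countTeams.2.1) (pvRaiseWitness_countTeams.2.2.1) (pvRaiseWitness_countTeams.2.2.2) ∧ Raises_countTeams (pvRaiseWitness_countTeams.1) (pvRaiseWitness_countTeams.2.1) (pvRaiseWitness_countTeams.2.2.1) (pvRaiseWitness_countTeams.2.2.2) ∧ countTeams_alt (pvRaiseWitness_countTeams.1) (pvRaiseWitness_countTeams.2.1) (pvRaiseWitness_countTeams.2.2.1) (pvRaiseWitness_countTeams.2.2.2)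 = pvRaiseWitnessOut_countTeams)

-- ===== LEMMAS AND PROOFS =====

-- pull a factor out of a product-fold
theorem mulFoldl (l : List Int) (a b : Int) :
    l.foldl (· * ·) (a * b) = a * l.foldl (· * ·) b := by
  induction l generalizing b with
  | nil => rfl
  | cons x t ih => simpa [List.foldl_cons, mul_assoc] using ih (b * x)

-- A's numerator: product over range(n, n-r, -1) is the descending factorial
theorem numerator_eq (r : Nat) : ∀ (n : Nat), r ≤ n →
    (PySem.List.pyRange (n : Int) ((n : Int) - (r : Int)) (-1)).foldl (· * ·) 1
      = (n.descFactorial r : Int) := by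
  induction r with
  | zero =>
    intro n _
    rw [PySem.List.pyRange_neg_one_eq_nil (by omega)]
    simp
  | succ r ih =>
    intro n hr
    obtain ⟨m, rfl⟩ : ∃ m, n = m + 1 := ⟨n - 1, by omega⟩
    have h2 : ((m + 1 : Nat) : Int) - ((r + 1 : Nat) : Int) = (m : Int) - (r : Int) := by
      push_cast; ring
    rw [h2, PySem.List.pyRange_neg_one_cons (by push_cast; omega)]
    have hx : ((m + 1 : Nat) : Int) - 1 = (m : Int) := by push_cast; ring
    rw [hx, List.foldl_cons,
        show (1 : Int) * ((m + 1 : Nat) : Int) = ((m + 1 : Nat) : Int) * 1 from by ring,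
        mulFoldl, ih m (by omega), Nat.succ_descFactorial_succ]
    push_cast; ring

-- A's denominator: product over range(1, r+1) is the factorial
theorem denominator_eq (r : Nat) :
    (PySem.List.pyRange 1 ((r : Int) + 1) 1).foldl (· * ·) 1 = (r.factorial : Int) := by
  induction r with
  | zero =>
    rw [PySem.List.pyRange_one_eq_nil (by norm_num)]
    simp [Nat.factorial]
  | succ r ih =>
    have h : ((r + 1 : Nat) : Int) + 1 = ((r : Int) + 1) + 1 := by push_cast; ring
    rw [h, PySem.List.pyRange_one_succ_right (by omega), List.foldl_append, ih]
    simp [Nat.factorial, Nat.succ_eq_add_one]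
    ring

-- A's nCr helper computes the binomial coefficient on its legal domain
theorem nCrPort_eq_choose (n r : Nat) (hn : 1 ≤ n) (hr : r ≤ n) :
    nCrPort (n : Int) (r : Int) = (n.choose r : Int) := by
  unfold nCrPort
  rw [if_neg (by omega)]
  have hmin : min (r : Int) ((n : Int) - (r : Int)) = ((min r (n - r) : Nat) : Int) := by
    rcases le_total r (n - r) with h | h
    · rw [min_eq_left (by omega), Nat.min_eq_left h]
    · rw [min_eq_right (by omega), Nat.min_eq_right h]; omega
  simp only [hmin]
  set t := min r (n - r) with ht
  have htn : t ≤ n := le_trans (Nat.min_le_left _ _) hr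
  rw [numerator_eq t n htn, denominator_eq t, PySem.Int.floordiv_natCast,
      ← Nat.choose_eq_descFactorial_div_factorial]
  congr 1
  by_cases h1 : r ≤ n - r
  · rw [ht, Nat.min_eq_left h1]
  · rw [ht, Nat.min_eq_right (by omega), Nat.choose_symm hr]

-- bridge: list-range sums are Finset.range sums
theorem listSum_eq_finsetSum (f : Nat → Int) (n : Nat) :
    ((List.range n).map f).sum = ∑ i ∈ Finset.range n, f i := by
  induction n with
  | zero => simp
  | succ k ih => rw [Finset.sum_range_succ, List.range_succ]; simp [ih]

-- A's answer loop: the sum of C(c, k) for k in range(m, c+1)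
theorem A_loop_eq (c m : Nat) (hc : 1 ≤ c) (hm : m ≤ c) :
    (PySem.List.pyRange (m : Int) ((c : Int) + 1) 1).foldl
        (fun answer k => answer + nCrPort (c : Int) k) 0
      = ∑ j ∈ Finset.range (c + 1 - m), (c.choose (m + j) : Int) := by
  rw [PySem.List.foldl_add, zero_add, PySem.List.pyRange_one]
  have hlen : (((c : Int) + 1) - (m : Int)).toNat = c + 1 - m := by omega
  rw [hlen, ← listSum_eq_finsetSum (fun j => (c.choose (m + j) : Int)) (c + 1 - m)]
  rw [List.map_map]
  congr 1
  apply List.map_congr_left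
  intro j hj
  rw [List.mem_range] at hj
  show nCrPort (c : Int) ((m : Int) + (j : Int)) = (c.choose (m + j) : Int)
  have : (m : Int) + (j : Int) = ((m + j : Nat) : Int) := by push_cast; ring
  rw [this, nCrPort_eq_choose c (m + j) hc (by omega)]

-- B's loop invariant: after range(m) the state is (C(c, m), sum of C(c, k) for k < m)
theorem B_loop_inv (c : Nat) : ∀ (m : Nat), m ≤ c →
    (PySem.List.pyRange 0 (m : Int) 1).foldl
        (fun (st : Int × Int) k =>
          (PySem.Int.floordiv (st.1 * ((c : Int) - k)) (k + 1), st.2 + st.1))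
        (1, 0)
      = ((c.choose m : Int), ∑ k ∈ Finset.range m, (c.choose k : Int)) := by
  intro m
  induction m with
  | zero =>
    intro _
    rw [PySem.List.pyRange_one_eq_nil (by norm_num)]
    simp
  | succ m ih =>
    intro hm
    have h : ((m + 1 : Nat) : Int) = ((m : Nat) : Int) + 1 := by push_cast; ring
    rw [h, PySem.List.pyRange_one_succ_right (by positivity), List.foldl_append,
        ih (by omega), List.foldl_cons, List.foldl_nil]
    have hcoef : PySem.Int.floordiv ((c.choose m : Int) * ((c : Int) - (m : Int))) ((m : Int) + 1)
        = (c.choose (m + 1) : Int) := by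
      have hcm : (c.choose m : Int) * ((c : Int) - (m : Int)) = ((c.choose (m + 1) * (m + 1) : Nat) : Int) := by
        have := Nat.choose_succ_right_eq c m
        have hsub : ((c - m : Nat) : Int) = (c : Int) - (m : Int) := by omega
        rw [← hsub, ← Nat.cast_mul]
        exact_mod_cast this.symm
      have hone : (m : Int) + 1 = ((m + 1 : Nat) : Int) := by push_cast; ring
      rw [hcm, hone, PySem.Int.floordiv_natCast, Nat.mul_div_cancel _ (by omega)]
    rw [hcoef, Finset.sum_range_succ]

-- the binomial identity connecting the two loops
theorem split_identity (c m : Nat) (hm : m ≤ c) :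
    (∑ j ∈ Finset.range (c + 1 - m), (c.choose (m + j) : Int))
      = 2 ^ c - ∑ k ∈ Finset.range m, (c.choose k : Int) := by
  have htot : (∑ k ∈ Finset.range m, (c.choose k : Int))
      + (∑ j ∈ Finset.range (c + 1 - m), (c.choose (m + j) : Int)) = 2 ^ c := by
    have hsplit : ∑ i ∈ Finset.range (m + (c + 1 - m)), (c.choose i : Int)
        = (∑ k ∈ Finset.range m, (c.choose k : Int))
          + ∑ j ∈ Finset.range (c + 1 - m), (c.choose (m + j) : Int) := by
      rw [Finset.sum_range_add]
    have hmc : m + (c + 1 - m) = c + 1 := by omega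
    rw [hmc] at hsplit
    rw [← hsplit]
    have := Nat.sum_range_choose c
    calc ∑ i ∈ Finset.range (c + 1), (c.choose i : Int)
        = ((∑ i ∈ Finset.range (c + 1), c.choose i : Nat) : Int) := by push_cast; rfl
      _ = ((2 ^ c : Nat) : Int) := by rw [this]
      _ = 2 ^ c := by push_cast; rfl
  linarith

-- both counting loops compute countP
theorem countA_eq (skills : List Int) (lo hi : Int) :
    skills.foldl (fun acc p => if lo ≤ p ∧ p ≤ hi then acc + 1 else acc) (0 : Int)
      = (skills.countP (fun p => decide (lo ≤ p ∧ p ≤ hi)) : Int) := by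
  have := PySem.List.foldl_count_if (fun p => decide (lo ≤ p ∧ p ≤ hi)) skills 0
  simpa using this

theorem countB_eq (skills : List Int) (lo hi : Int) :
    (skills.map (fun s => if lo ≤ s ∧ s ≤ hi then (1 : Int) else 0)).sum
      = (skills.countP (fun p => decide (lo ≤ p ∧ p ≤ hi)) : Int) := by
  have := PySem.List.sum_map_ite_one_zero (fun p => decide (lo ≤ p ∧ p ≤ hi)) skills
  simpa using this

-- ===== VERDICT (by name: the statement is the Claim_ definition above) =====
theorem countTeams_spec : Claim_equal_countTeams := by
  intro skills minPlayers minLevel maxLevel _ hpre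
  unfold Spec_countTeams countTeams countTeams_alt
  set cN := skills.countP (fun p => decide (minLevel ≤ p ∧ p ≤ maxLevel)) with hcN
  rw [countA_eq, countB_eq, ← hcN]
  by_cases hlt : (cN : Int) < minPlayers
  · simp [hlt]
  · rw [if_neg hlt, if_neg hlt]
    have hlt2 : minPlayers ≤ (cN : Int) := by omega
    have hm0 : 0 ≤ minPlayers := by
      rcases hpre with h | ⟨h, _⟩ <;> omega
    obtain ⟨mN, rfl⟩ : ∃ mN : Nat, minPlayers = (mN : Int) := ⟨minPlayers.toNat, by omega⟩
    have hmc : mN ≤ cN := by exact_mod_cast hlt2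
    have hc1 : 1 ≤ cN := by
      rcases hpre with h | ⟨_, h⟩
      · omega
      · exact h
    rw [A_loop_eq cN mN hc1 hmc, B_loop_inv cN mN hmc, split_identity cN mN hmc]
    have : ((cN : Int)).toNat = cN := by omega
    rw [this]

theorem countTeams_raises : Claim_raises_countTeams := by
  unfold Claim_raises_countTeams
  constructor
  · intro skills m lo hi _ hr hpre
    rcases hr with h | ⟨h, hc⟩ <;> rcases hpre with h2 | ⟨h2, hc2⟩ <;> omega
  · exact ⟨by decide, by decide, by decide⟩

-- self-check: the raise-witness lies in Raises_ and B's port returns the stated value there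
theorem countTeams_raises_witness_ok :
    Raises_countTeams [] 0 0 0 ∧ countTeams_alt [] 0 0 0 = pvRaiseWitnessOut_countTeams :=
  ⟨countTeams_raises.2.2.1, countTeams_raises.2.2.2⟩
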